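-- pv_equiv track=rewrite | github.com/studentdotai/Nautical-Graph-Toolkit | src/nautical_graph_toolkit/utils/misc_utils.py | name_list_to_bands
-- ===== SOURCE A (Python) =====
-- from typing import Union, List, Dict
--
-- def name_list_to_bands(name_list: List[str]) -> Dict[str, List[str]]:
--     """
--     Segregates a list of ENC names into appropriate Usage Bands.
--
--     Usage Bands:
--     1: Overview, 2: General, 3: Coastal, 4: Approach, 5: Harbour, 6: Berthing
--     """
--     if not name_list:
--         return {}
--
--     usage_bands = {
--         'Overview': [], 'General': [], 'Coastal': [],
--         'Approach': [], 'Harbour': [], 'Berthing': []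
--     }
--
--     for enc in name_list:
--         if len(enc) > 2:
--             usage_band_char = enc[2]
--             if usage_band_char == '1':
--                 usage_bands['Overview'].append(enc)
--             elif usage_band_char == '2':
--                 usage_bands['General'].append(enc)
--             elif usage_band_char == '3':
--                 usage_bands['Coastal'].append(enc)
--             elif usage_band_char == '4':
--                 usage_bands['Approach'].append(enc)
--             elif usage_band_char == '5':
--                 usage_bands['Harbour'].append(enc)
--             elif usage_band_char == '6':
--                 usage_bands['Berthing'].append(enc)
--
--     return {k: v for k, v in usage_bands.items() if v}
-- ===== SOURCE B (Python) =====
-- # B: iterate over an ordered band->digit mapping and filter the name list per band,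
-- # instead of dispatching each name through an if/elif chain into pre-made buckets.
-- BANDS = [('Overview', '1'), ('General', '2'), ('Coastal', '3'),
--          ('Approach', '4'), ('Harbour', '5'), ('Berthing', '6')]
--
-- def name_list_to_bands(name_list):
--     grouped = {band: [e for e in name_list if len(e) > 2 and e[2] == ch]
--                for band, ch in BANDS}
--     return {band: lst for band, lst in grouped.items() if lst}
-- ===== Notes on version B (the rewrite author's own statement) =====
-- stated objective: idiomatic
-- what changed: B replaces A's per-element if/elif dispatch into pre-initialised buckets by a band-first dict comprehension: for each (band, digit) pair it filters the name list once, then drops empty bands.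
import Mathlib
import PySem

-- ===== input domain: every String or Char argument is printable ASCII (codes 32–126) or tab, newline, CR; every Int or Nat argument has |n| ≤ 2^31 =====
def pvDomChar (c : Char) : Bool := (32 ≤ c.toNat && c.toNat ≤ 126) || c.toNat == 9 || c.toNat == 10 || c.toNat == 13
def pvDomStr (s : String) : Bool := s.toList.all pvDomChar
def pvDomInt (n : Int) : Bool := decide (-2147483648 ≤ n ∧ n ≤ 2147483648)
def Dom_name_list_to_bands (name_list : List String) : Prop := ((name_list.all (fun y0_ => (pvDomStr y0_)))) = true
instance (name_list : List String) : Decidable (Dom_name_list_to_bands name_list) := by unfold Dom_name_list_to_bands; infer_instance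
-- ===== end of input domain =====

-- B replaces A's per-element if/elif dispatch into pre-made buckets by a band-first
-- comprehension: one filter of the name list per band, empty bands dropped (idiomatic).


-- ===== PORT A =====
-- one loop step: dispatch enc on its 3rd character into the matching bucket
def bandStep (d : PySem.Dict String (List String)) (enc : String) : PySem.Dict String (List String) :=
  if PySem.Str.len enc > 2 then
    let c? := PySem.Str.pyGet? enc 2
    if c? = some '1' then d.modify "Overview" [] (· ++ [enc])
    else if c? = some '2' then d.modify "General" [] (· ++ [enc])
    else if c? = some '3' then d.modify "Coastal" [] (· ++ [enc])
    else if c? = some '4' then d.modify "Approach" [] (· ++ [enc])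
    else if c? = some '5' then d.modify "Harbour" [] (· ++ [enc])
    else if c? = some '6' then d.modify "Berthing" [] (· ++ [enc])
    else d
  else d

def name_list_to_bands (name_list : List String) : List (String × List String) :=
  if name_list = [] then []
  else
    let init : PySem.Dict String (List String) :=
      PySem.Dict.ofList [("Overview", []), ("General", []), ("Coastal", []),
                         ("Approach", []), ("Harbour", []), ("Berthing", [])]
    ((name_list.foldl bandStep init).items).filter (fun kv => !kv.2.isEmpty)

-- ===== PORT B =====
def bandsB : List (String × Char) :=
  [("Overview", '1'), ("General", '2'), ("Coastal", '3'),
   ("Approach", '4'), ("Harbour", '5'), ("Berthing", '6')]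

def name_list_to_bands_alt (name_list : List String) : List (String × List String) :=
  (bandsB.map (fun bc =>
      (bc.1, name_list.filter
        (fun e => decide (PySem.Str.len e > 2) && (PySem.Str.pyGet? e 2 == some bc.2))))).filter
    (fun kv => !kv.2.isEmpty)

-- ===== PRECONDITION & SPEC =====
def Spec_name_list_to_bands (name_list : List String) (out : List (String × List String)) : Prop := out = name_list_to_bands_alt name_list
instance (name_list : List String) (out : List (String × List String)) : Decidable (Spec_name_list_to_bands name_list out) := by unfold Spec_name_list_to_bands; infer_instance

-- ===== CLAIM (what is proved, stated in full; the proofs are below) =====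
def Claim_equal_name_list_to_bands : Prop := ∀ (name_list : List String), Dom_name_list_to_bands name_list → Spec_name_list_to_bands name_list (name_list_to_bands name_list)

-- ===== LEMMAS AND PROOFS =====

def bandPred (c : Char) (e : String) : Bool :=
  decide (PySem.Str.len e > 2) && (PySem.Str.pyGet? e 2 == some c)

-- the loop invariant: folding bandStep over l from the six-bucket dict appends the filters
theorem bandStep_fold (l : List String) (u1 u2 u3 u4 u5 u6 : List String) :
    l.foldl bandStep (PySem.Dict.mk
        [("Overview", u1), ("General", u2), ("Coastal", u3),
         ("Approach", u4), ("Harbour", u5), ("Berthing", u6)]) =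
    PySem.Dict.mk
        [("Overview", u1 ++ l.filter (bandPred '1')),
         ("General", u2 ++ l.filter (bandPred '2')),
         ("Coastal", u3 ++ l.filter (bandPred '3')),
         ("Approach", u4 ++ l.filter (bandPred '4')),
         ("Harbour", u5 ++ l.filter (bandPred '5')),
         ("Berthing", u6 ++ l.filter (bandPred '6'))] := by
  induction l generalizing u1 u2 u3 u4 u5 u6 with
  | nil => simp
  | cons e l ih =>
    simp only [List.foldl_cons, List.filter_cons]
    by_cases hlen : 2 < e.length
    · have htl : 2 < e.toList.length := by simpa using hlen
      by_cases h1 : e.toList[2]'htl = '1'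
      · simp [bandStep, hlen, bandPred, PySem.Dict.modify, PySem.Dict.contains, PySem.Dict.get?, PySem.Dict.getD, PySem.Dict.insert, h1, ih]
      · by_cases h2 : e.toList[2]'htl = '2'
        · simp [bandStep, hlen, bandPred, PySem.Dict.modify, PySem.Dict.contains, PySem.Dict.get?, PySem.Dict.getD, PySem.Dict.insert, h1, h2, ih]
        · by_cases h3 : e.toList[2]'htl = '3'
          · simp [bandStep, hlen, bandPred, PySem.Dict.modify, PySem.Dict.contains, PySem.Dict.get?, PySem.Dict.getD, PySem.Dict.insert, h1, h2, h3, ih]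
          · by_cases h4 : e.toList[2]'htl = '4'
            · simp [bandStep, hlen, bandPred, PySem.Dict.modify, PySem.Dict.contains, PySem.Dict.get?, PySem.Dict.getD, PySem.Dict.insert, h1, h2, h3, h4, ih]
            · by_cases h5 : e.toList[2]'htl = '5'
              · simp [bandStep, hlen, bandPred, PySem.Dict.modify, PySem.Dict.contains, PySem.Dict.get?, PySem.Dict.getD, PySem.Dict.insert, h1, h2, h3, h4, h5, ih]
              · by_cases h6 : e.toList[2]'htl = '6'
                · simp [bandStep, hlen, bandPred, PySem.Dict.modify, PySem.Dict.contains, PySem.Dict.get?, PySem.Dict.getD, PySem.Dict.insert, h1, h2, h3, h4, h5, h6, ih]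
                · simp [bandStep, hlen, bandPred, PySem.Dict.modify, PySem.Dict.contains, PySem.Dict.get?, PySem.Dict.getD, PySem.Dict.insert, h1, h2, h3, h4, h5, h6, ih]
    · simp [bandStep, hlen, bandPred, ih]

theorem bandPred_eq (c : Char) :
    bandPred c = fun e => decide (2 < e.length) && (PySem.List.pyGet? e.toList 2 == some c) := by
  funext e; simp [bandPred]

-- ===== VERDICT (by name: the statement is the Claim_ definition above) =====
theorem name_list_to_bands_spec : Claim_equal_name_list_to_bands := by
  intro l _
  show name_list_to_bands l = name_list_to_bands_alt l
  by_cases hnil : l = []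
  · subst hnil; rfl
  · simp only [name_list_to_bands, name_list_to_bands_alt, hnil, bandsB]
    rw [show PySem.Dict.ofList
        [("Overview", ([] : List String)), ("General", []), ("Coastal", []),
         ("Approach", []), ("Harbour", []), ("Berthing", [])] =
      PySem.Dict.mk
        [("Overview", []), ("General", []), ("Coastal", []),
         ("Approach", []), ("Harbour", []), ("Berthing", [])] from by decide]
    rw [bandStep_fold]
    simp [bandPred_eq]
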